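-- pv_equiv track=rewrite | github.com/Bshowg/check_csv_equality | src/compare_csv_folders.py | sort_rows_progressively
-- ===== SOURCE A (Python) =====
-- from typing import Dict, List, Optional, Tuple
--
-- def normalize_cell(s: str, trim: bool, lower: bool) -> str:
--     if s is None:
--         s = ""
--     if trim:
--         s = s.strip()
--     if lower:
--         s = s.lower()
--     return s
--
-- def sort_rows_progressively(
--     rows: List[List[str]],
--     num_cols: int,
--     trim_cells: bool,
--     lower_cells: bool,
-- ) -> List[Tuple[int, List[str]]]:
--     """
--     Sort rows using progressive column ordering.
--     First by column 0, then by column 1 if column 0 is equal, etc.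
--
--     Returns: List of tuples (original_index, row) sorted by row content.
--     """
--     if not rows or num_cols == 0:
--         return [(i, row) for i, row in enumerate(rows)]
--
--     # Create tuples of (original_index, row)
--     indexed_rows = [(i, row) for i, row in enumerate(rows)]
--
--     def sort_key(indexed_row: Tuple[int, List[str]]) -> Tuple:
--         row = indexed_row[1]
--         # Normalize cells for comparison and create a tuple for sorting
--         # Extend row with empty strings if it's shorter than num_cols
--         extended_row = row + [''] * (num_cols - len(row))
--         return tuple(
--             normalize_cell(extended_row[i], trim=trim_cells, lower=lower_cells)
--             for i in range(num_cols)
--         )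
--
--     return sorted(indexed_rows, key=sort_key)
-- ===== SOURCE B (Python) =====
-- from typing import List, Tuple
--
--
-- def _norm(s: str, trim: bool, lower: bool) -> str:
--     if trim:
--         s = s.strip()
--     if lower:
--         s = s.lower()
--     return s
--
--
-- def sort_rows_progressively(
--     rows: List[List[str]],
--     num_cols: int,
--     trim_cells: bool,
--     lower_cells: bool,
-- ) -> List[Tuple[int, List[str]]]:
--     """LSD multi-pass stable sort: one stable pass per column, last column first.
--
--     Python's sort is stable, so sorting successively on columns num_cols-1 .. 0
--     yields exactly the progressive (column 0, then 1, ...) ordering with ties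
--     broken by original index.
--     """
--     if not rows or num_cols == 0:
--         return list(enumerate(rows))
--
--     indexed_rows = list(enumerate(rows))
--     for col in reversed(range(num_cols)):
--         indexed_rows = sorted(
--             indexed_rows,
--             key=lambda ir: _norm(ir[1][col] if col < len(ir[1]) else '',
--                                  trim_cells, lower_cells),
--         )
--     return indexed_rows
-- ===== Notes on version B (the rewrite author's own statement) =====
-- stated objective: alternative
-- what changed: Replaces the single sort on a padded num_cols-tuple key with an LSD-style sequence of stable single-column sorts (columns num_cols-1 down to 0), relying on sort stability to reproduce the progressive tuple order with ties kept in original-index order.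
import Mathlib
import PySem

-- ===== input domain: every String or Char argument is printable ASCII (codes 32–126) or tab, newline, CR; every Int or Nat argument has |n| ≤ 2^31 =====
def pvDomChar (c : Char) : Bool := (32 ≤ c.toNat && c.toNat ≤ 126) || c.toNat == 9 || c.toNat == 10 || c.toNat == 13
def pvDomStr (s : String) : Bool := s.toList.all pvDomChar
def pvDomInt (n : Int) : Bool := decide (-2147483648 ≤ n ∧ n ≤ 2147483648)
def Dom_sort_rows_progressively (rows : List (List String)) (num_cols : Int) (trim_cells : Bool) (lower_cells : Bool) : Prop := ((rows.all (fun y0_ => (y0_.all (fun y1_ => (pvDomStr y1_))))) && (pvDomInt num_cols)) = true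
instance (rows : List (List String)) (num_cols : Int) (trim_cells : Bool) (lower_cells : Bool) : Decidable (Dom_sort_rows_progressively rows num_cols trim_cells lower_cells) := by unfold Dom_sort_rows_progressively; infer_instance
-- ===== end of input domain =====

-- B replaces A's single sort on a padded num_cols-tuple key by a sequence of stable
-- single-column sorts from the last column down to the first (LSD radix style);
-- objective: alternative decomposition, same results.

-- ===== PORT A =====
-- 'if s is None' in A cannot fire for a str argument; it is omitted.
def normalize_cell (s : String) (trim : Bool) (lower : Bool) : String :=
  let s1 := if trim then PySem.Str.strip s else s
  if lower then PySem.Str.lower s1 else s1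

-- A's nested 'sort_key': tuple of normalized cells of the padded row (tuple → List String,
-- Python tuple comparison = lexicographic = List.lt). extended_row[i] is always in range
-- for i in range(num_cols), so pyGetD's default is never used.
def sort_key_A (num_cols : Int) (trim_cells : Bool) (lower_cells : Bool)
    (indexed_row : Int × List String) : List String :=
  let row := indexed_row.2
  let extended_row := row ++ PySem.List.pyRepeat [""] (num_cols - (row.length : Int))
  (PySem.List.pyRange 0 num_cols).map
    (fun i => normalize_cell (PySem.List.pyGetD extended_row i "") trim_cells lower_cells)

def sort_rows_progressively (rows : List (List String)) (num_cols : Int) (trim_cells : Bool) (lower_cells : Bool) : List (Int × List String) :=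
  if rows = [] ∨ num_cols = 0 then
    PySem.List.enumerate rows
  else
    PySem.List.sorted (PySem.List.enumerate rows)
      (sort_key_A num_cols trim_cells lower_cells) false

-- ===== PORT B =====
def norm_cell_alt (s : String) (trim : Bool) (lower : Bool) : String :=
  let s1 := if trim then PySem.Str.strip s else s
  if lower then PySem.Str.lower s1 else s1

-- Source B's per-pass key "row[col] if col < len(row) else ''" with col ≥ 0 is exactly pyGetD row col "".
def sort_rows_progressively_alt (rows : List (List String)) (num_cols : Int) (trim_cells : Bool) (lower_cells : Bool) : List (Int × List String) :=
  if rows = [] ∨ num_cols = 0 then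
    PySem.List.enumerate rows
  else
    (PySem.List.pyRange 0 num_cols).reverse.foldl
      (fun indexed_rows col =>
        PySem.List.sorted indexed_rows
          (fun ir => norm_cell_alt (PySem.List.pyGetD ir.2 col "") trim_cells lower_cells) false)
      (PySem.List.enumerate rows)

-- ===== PRECONDITION & SPEC =====
def Spec_sort_rows_progressively (rows : List (List String)) (num_cols : Int) (trim_cells : Bool) (lower_cells : Bool) (out : List (Int × List String)) : Prop := out = sort_rows_progressively_alt rows num_cols trim_cells lower_cells
instance (rows : List (List String)) (num_cols : Int) (trim_cells : Bool) (lower_cells : Bool) (out : List (Int × List String)) : Decidable (Spec_sort_rows_progressively rows num_cols trim_cells lower_cells out) := by unfold Spec_sort_rows_progressively; infer_instance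

-- ===== CLAIM (what is proved, stated in full; the proofs are below) =====
def Claim_equal_sort_rows_progressively : Prop := ∀ (rows : List (List String)) (num_cols : Int) (trim_cells : Bool) (lower_cells : Bool), Dom_sort_rows_progressively rows num_cols trim_cells lower_cells → Spec_sort_rows_progressively rows num_cols trim_cells lower_cells (sort_rows_progressively rows num_cols trim_cells lower_cells)

-- ===== LEMMAS AND PROOFS =====

-- the single-column key of pass `c`
def keyAt (trim lower : Bool) (c : Int) (ir : Int × List String) : String :=
  norm_cell_alt (PySem.List.pyGetD ir.2 c "") trim lower

-- "sorted by columns cs progressively, ties by original index": the strict order both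
-- results are pairwise-increasing in.
def RRel (trim lower : Bool) : List Int → (Int × List String) → (Int × List String) → Prop
  | [], a, b => a.1 < b.1
  | c :: cs, a, b => keyAt trim lower c a < keyAt trim lower c b ∨
      (keyAt trim lower c a = keyAt trim lower c b ∧ RRel trim lower cs a b)

-- the combined relation produced by one stable pass keyed by `key` over a list pairwise in `S`
def CRel {α κ : Type} [LT κ] (key : α → κ) (S : α → α → Prop) (a b : α) : Prop :=
  key a < key b ∨ (key a = key b ∧ S a b)

lemma pv_insertBy_cons {α : Type} (bef : α → α → Bool) (x y : α) (ys : List α) :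
    PySem.List.insertBy bef x (y :: ys) =
      if bef x y then x :: y :: ys else y :: PySem.List.insertBy bef x ys := rfl

-- STABILITY of one insertion: inserting x after everything S-below it preserves CRel-pairwiseness
lemma pv_pairwise_insertBy {α κ : Type} [LT κ] [DecidableLT κ] (key : α → κ)
    (htr : ∀ a b c : κ, a < b → b < c → a < c)
    (htot : ∀ a b : κ, a < b ∨ a = b ∨ b < a)
    (S : α → α → Prop) (x : α) (acc : List α)
    (hp : acc.Pairwise (CRel key S))
    (hx : ∀ y ∈ acc, S y x) :
    (PySem.List.insertBy (fun a b => decide (key a < key b)) x acc).Pairwise (CRel key S) := by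
  induction acc with
  | nil => simp [PySem.List.insertBy]
  | cons y ys ih =>
    rw [pv_insertBy_cons]
    rw [List.pairwise_cons] at hp
    by_cases h : key x < key y
    · simp only [h, decide_true, if_true]
      refine List.pairwise_cons.mpr ⟨?_, List.pairwise_cons.mpr hp⟩
      intro z hz
      rcases List.mem_cons.mp hz with rfl | hz'
      · exact Or.inl h
      · rcases hp.1 z hz' with h2 | ⟨h2, _⟩
        · exact Or.inl (htr _ _ _ h h2)
        · exact Or.inl (h2 ▸ h)
    · simp only [h, decide_false]
      refine List.pairwise_cons.mpr ⟨?_, ?_⟩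
      · intro z hz
        rcases (PySem.List.mem_insertBy _ x z ys).mp hz with rfl | hz'
        · rcases htot (key y) (key z) with h2 | h2 | h2
          · exact Or.inl h2
          · exact Or.inr ⟨h2, hx y List.mem_cons_self⟩
          · exact absurd h2 h
        · exact hp.1 z hz'
      · exact ih hp.2 (fun y' h' => hx y' (List.mem_cons_of_mem _ h'))

lemma pv_pairwise_foldl_insertBy {α κ : Type} [LT κ] [DecidableLT κ] (key : α → κ)
    (htr : ∀ a b c : κ, a < b → b < c → a < c)
    (htot : ∀ a b : κ, a < b ∨ a = b ∨ b < a)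
    (S : α → α → Prop) :
    ∀ (xs acc : List α), acc.Pairwise (CRel key S) → xs.Pairwise S →
      (∀ y ∈ acc, ∀ x ∈ xs, S y x) →
      (xs.foldl (fun acc x => PySem.List.insertBy (fun a b => decide (key a < key b)) x acc) acc).Pairwise (CRel key S) := by
  intro xs
  induction xs with
  | nil => intro acc hacc _ _; simpa using hacc
  | cons x xs ih =>
    intro acc hacc hxs hcross
    rw [List.pairwise_cons] at hxs
    simp only [List.foldl_cons]
    refine ih _ ?_ hxs.2 ?_
    · exact pv_pairwise_insertBy key htr htot S x acc hacc
        (fun y hy => hcross y hy x List.mem_cons_self)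
    · intro y hy z hz
      rcases (PySem.List.mem_insertBy _ x y acc).mp hy with rfl | hy'
      · exact hxs.1 z hz
      · exact hcross y hy' z (List.mem_cons_of_mem _ hz)

-- STABILITY of one whole stable sort pass
lemma pv_sorted_pairwise_stable {α κ : Type} [LT κ] [DecidableLT κ] (key : α → κ)
    (htr : ∀ a b c : κ, a < b → b < c → a < c)
    (htot : ∀ a b : κ, a < b ∨ a = b ∨ b < a)
    (S : α → α → Prop) (xs : List α) (h : xs.Pairwise S) :
    (PySem.List.sorted xs key false).Pairwise (CRel key S) := by
  rw [PySem.List.sorted_eq_foldl_insertBy]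
  exact pv_pairwise_foldl_insertBy key htr htot S xs [] (by simp) h (by simp)

lemma pv_RRel_asymm (t l : Bool) :
    ∀ (cs : List Int) (a b : Int × List String),
      RRel t l cs a b → RRel t l cs b a → False := by
  intro cs
  induction cs with
  | nil =>
    intro a b h1 h2
    simp only [RRel] at h1 h2
    omega
  | cons c cs ih =>
    intro a b h1 h2
    rcases h1 with h1 | ⟨e1, r1⟩ <;> rcases h2 with h2 | ⟨e2, r2⟩
    · exact absurd h1 (lt_asymm h2)
    · exact absurd h1 (e2 ▸ lt_irrefl _)
    · exact absurd h2 (e1 ▸ lt_irrefl _)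
    · exact ih a b r1 r2

-- B's passes: folding the stable single-column sorts over cs.reverse yields RRel cs pairwiseness
lemma pv_B_pairwise (rows : List (List String)) (t l : Bool) :
    ∀ cs : List Int,
      (cs.reverse.foldl
        (fun acc col => PySem.List.sorted acc (fun ir => keyAt t l col ir) false)
        (PySem.List.enumerate rows)).Pairwise (RRel t l cs) := by
  intro cs
  induction cs with
  | nil =>
    simpa [RRel] using PySem.List.pairwise_lt_enumerate rows 0
  | cons c cs ih =>
    rw [List.reverse_cons, List.foldl_append]
    simp only [List.foldl_cons, List.foldl_nil]
    have h := pv_sorted_pairwise_stable (keyAt t l c)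
      (fun a b c h1 h2 => lt_trans h1 h2) (fun a b => lt_trichotomy a b)
      (RRel t l cs) _ ih
    exact h.imp (fun hab => hab)

lemma pv_B_perm (rows : List (List String)) (t l : Bool) :
    ∀ cs : List Int,
      (cs.reverse.foldl
        (fun acc col => PySem.List.sorted acc (fun ir => keyAt t l col ir) false)
        (PySem.List.enumerate rows)).Perm (PySem.List.enumerate rows) := by
  intro cs
  induction cs with
  | nil => simp
  | cons c cs ih =>
    rw [List.reverse_cons, List.foldl_append]
    simp only [List.foldl_cons, List.foldl_nil]
    exact (PySem.List.sorted_perm _ _ _).trans ih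

-- padding never changes the cell read at a nonnegative index (missing cells read as "")
lemma pv_getD_ext (row : List String) (num_cols c : Int) (hc : 0 ≤ c) :
    PySem.List.pyGetD (row ++ PySem.List.pyRepeat [""] (num_cols - (row.length : Int))) c ""
      = PySem.List.pyGetD row c "" := by
  rw [PySem.List.pyGetD_of_nonneg _ _ hc, PySem.List.pyGetD_of_nonneg _ _ hc]
  rw [PySem.List.pyRepeat_singleton]
  by_cases h : c.toNat < row.length
  · simp [List.getD, List.getElem?_append_left h]
  · rw [Nat.not_lt] at h
    simp only [List.getD, List.getElem?_append_right h, List.getElem?_replicate,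
      List.getElem?_eq_none (by omega : row.length ≤ c.toNat)]
    split <;> simp

-- A's tuple key is the list of the single-column keys over the columns
lemma pv_keyA_eq (num_cols : Int) (t l : Bool) (ir : Int × List String) :
    sort_key_A num_cols t l ir = (PySem.List.pyRange 0 num_cols).map (fun c => keyAt t l c ir) := by
  unfold sort_key_A
  refine List.map_congr_left ?_
  intro c hc
  have hc0 : 0 ≤ c := (PySem.List.mem_pyRange_one.mp hc).1
  simp only [keyAt, pv_getD_ext ir.2 num_cols c hc0]
  rfl

-- lexicographic comparison of the key lists + index tiebreak = the progressive relation
lemma pv_lex_iff (t l : Bool) :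
    ∀ (cs : List Int) (a b : Int × List String),
      (cs.map (fun c => keyAt t l c a) < cs.map (fun c => keyAt t l c b) ∨
        (cs.map (fun c => keyAt t l c a) = cs.map (fun c => keyAt t l c b) ∧ a.1 < b.1))
      ↔ RRel t l cs a b := by
  intro cs
  induction cs with
  | nil =>
    intro a b
    simp only [List.map_nil, RRel]
    constructor
    · rintro (h | ⟨_, h⟩)
      · exact absurd h (List.not_lt_nil [])
      · exact h
    · exact fun h => Or.inr ⟨trivial, h⟩
  | cons c cs ih =>
    intro a b
    simp only [List.map_cons, RRel, List.cons_lt_cons_iff, List.cons.injEq]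
    rw [← ih a b]
    tauto

-- A's sort is pairwise in the progressive relation over cols = range(num_cols)
lemma pv_A_pairwise (rows : List (List String)) (num_cols : Int) (t l : Bool) :
    (PySem.List.sorted (PySem.List.enumerate rows)
      (sort_key_A num_cols t l) false).Pairwise (RRel t l (PySem.List.pyRange 0 num_cols)) := by
  have h := pv_sorted_pairwise_stable (sort_key_A num_cols t l)
    (fun a b c h1 h2 => lt_trans h1 h2) (fun a b => lt_trichotomy a b)
    (fun a b => a.1 < b.1) _ (PySem.List.pairwise_lt_enumerate rows 0)
  refine h.imp ?_
  intro a b hab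
  rw [← pv_lex_iff t l (PySem.List.pyRange 0 num_cols) a b]
  rw [← pv_keyA_eq num_cols t l a, ← pv_keyA_eq num_cols t l b]
  exact hab

-- ===== VERDICT (by name: the statement is the Claim_ definition above) =====
theorem sort_rows_progressively_spec : Claim_equal_sort_rows_progressively := by
  intro rows num_cols t l _
  unfold Spec_sort_rows_progressively sort_rows_progressively sort_rows_progressively_alt
  by_cases hg : rows = [] ∨ num_cols = 0
  · simp [hg]
  · simp only [hg, if_false]
    have hB : ((PySem.List.pyRange 0 num_cols).reverse.foldl
        (fun acc col => PySem.List.sorted acc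
          (fun ir => norm_cell_alt (PySem.List.pyGetD ir.2 col "") t l) false)
        (PySem.List.enumerate rows))
        = ((PySem.List.pyRange 0 num_cols).reverse.foldl
        (fun acc col => PySem.List.sorted acc (fun ir => keyAt t l col ir) false)
        (PySem.List.enumerate rows)) := rfl
    rw [hB]
    refine List.Perm.eq_of_pairwise
      (le := RRel t l (PySem.List.pyRange 0 num_cols))
      (fun a b _ _ hab hba => (pv_RRel_asymm t l _ a b hab hba).elim)
      (pv_A_pairwise rows num_cols t l)
      (pv_B_pairwise rows t l (PySem.List.pyRange 0 num_cols))
      ?_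
    exact (PySem.List.sorted_perm _ _ _).trans
      ((pv_B_perm rows t l (PySem.List.pyRange 0 num_cols)).symm)
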